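-- pv_equiv track=rewrite | github.com/chengwenjiesh/leetcodepysolution | 1361ValidateBinaryTreeNodes.py | validateBinaryTreeNodes2
-- ===== SOURCE A (Python) =====
-- from typing import List
-- from collections import deque
--
-- def validateBinaryTreeNodes2(n: int, leftChild: List[int], rightChild: List[int]):
--     if not leftChild or not rightChild or len(leftChild) != len(rightChild):
--         return False
--
--     totalNodes = set(leftChild + rightChild)
--     totalRoot = 0
--     root = 0
--     for i in range(n):
--         if not i in totalNodes:
--             root = i
--             totalRoot += 1
--     if totalRoot > 1 or totalRoot == 0:
--         return False
--
--     nodeQueue = deque([root])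
--     visited = {root}
--
--     while nodeQueue:
--         curr = nodeQueue.popleft()
--         if leftChild[curr] != -1:
--             if leftChild[curr] in visited:
--                 return False
--             else:
--                 visited.add(leftChild[curr])
--                 nodeQueue.append(leftChild[curr])
--         if rightChild[curr] != -1:
--             if rightChild[curr] in visited:
--                 return False
--             else:
--                 visited.add(rightChild[curr])
--                 nodeQueue.append(rightChild[curr])
--
--     return len(visited) == n
-- ===== SOURCE B (Python) =====
-- def validateBinaryTreeNodes2(n, leftChild, rightChild):
--     if not leftChild or not rightChild or len(leftChild) != len(rightChild):
--         return False
--     # all declared child slots; a valid tree has exactly n-1 of them, all distinct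
--     kids = [c for pair in zip(leftChild[:n], rightChild[:n]) for c in pair if c != -1]
--     if len(kids) != n - 1 or len(set(kids)) != n - 1:
--         return False
--     # the n-1 distinct kids lie in [0, n): the root is the one missing value
--     root = n * (n - 1) // 2 - sum(kids)
--     # saturate reachability from the root; n rounds certainly reach the fixpoint
--     reach = {root}
--     for _ in range(n):
--         reach = reach | {c for i in reach for c in (leftChild[i], rightChild[i]) if c != -1}
--     return len(reach) == n
-- ===== Notes on version B (the rewrite author's own statement) =====
-- stated objective: alternative
-- what changed: Replaced A's root-scan over set(left+right) plus early-exit BFS with a queue by counting-based structural checks (exactly n-1 distinct child slots), a closed-form root (Gauss sum identity) and a set-saturation reachability fixpoint with no queue and no early exit.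
-- outside the precondition, e.g. on validateBinaryTreeNodes2(1, [-1, 0], [-1, -1]): A returns False, B returns True; on validateBinaryTreeNodes2(2, [-2, -1], [-1, -1]): A returns False, B raises IndexError
import Mathlib
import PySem

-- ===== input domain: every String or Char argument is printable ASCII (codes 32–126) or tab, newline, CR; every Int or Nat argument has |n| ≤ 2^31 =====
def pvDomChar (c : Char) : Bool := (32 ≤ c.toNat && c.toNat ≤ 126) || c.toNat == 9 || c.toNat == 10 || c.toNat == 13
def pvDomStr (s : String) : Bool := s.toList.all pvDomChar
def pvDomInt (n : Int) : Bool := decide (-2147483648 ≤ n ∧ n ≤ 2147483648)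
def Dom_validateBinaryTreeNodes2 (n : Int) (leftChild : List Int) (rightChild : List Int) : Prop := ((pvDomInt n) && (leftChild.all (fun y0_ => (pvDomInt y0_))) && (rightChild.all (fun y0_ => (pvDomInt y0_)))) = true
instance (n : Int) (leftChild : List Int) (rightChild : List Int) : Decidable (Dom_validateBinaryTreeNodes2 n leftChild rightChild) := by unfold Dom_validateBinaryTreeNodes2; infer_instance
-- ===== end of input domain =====

-- B re-implements A's BFS validation by counting checks (n-1 distinct child slots), a closed-form
-- root via the Gauss sum, and a saturation fixpoint for reachability (a different algorithm of similar size).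

-- ===== PORT A =====
-- the BFS 'while nodeQueue:' loop; fuel only makes the recursion structural (it never runs out
-- on inputs admitted by Pre_); 'none' = the loop body executed 'return False'
def bfsA (L R : List Int) : Nat → List Int → PySem.Set Int → Option (PySem.Set Int)
  | 0, _, _ => none
  | _ + 1, [], vis => some vis
  | fuel + 1, curr :: rest, vis =>
    let lc := PySem.List.pyGetD L curr 0
    if lc ≠ -1 ∧ lc ∈ vis then none
    else
      let vis1 := if lc ≠ -1 then PySem.Set.add vis lc else vis
      let q1 := if lc ≠ -1 then rest ++ [lc] else rest
      let rc := PySem.List.pyGetD R curr 0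
      if rc ≠ -1 ∧ rc ∈ vis1 then none
      else
        let vis2 := if rc ≠ -1 then PySem.Set.add vis1 rc else vis1
        let q2 := if rc ≠ -1 then q1 ++ [rc] else q1
        bfsA L R fuel q2 vis2

def validateBinaryTreeNodes2 (n : Int) (leftChild : List Int) (rightChild : List Int) : Bool :=
  if leftChild = [] ∨ rightChild = [] ∨ leftChild.length ≠ rightChild.length then false
  else
    let totalNodes : PySem.Set Int := PySem.Set.ofList (leftChild ++ rightChild)
    let tr := (PySem.List.pyRange 0 n 1).foldl
      (fun (p : Int × Int) i => if i ∉ totalNodes then (p.1 + 1, i) else p) (0, 0)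
    if 1 < tr.1 ∨ tr.1 = 0 then false
    else
      match bfsA leftChild rightChild (leftChild.length + 1) [tr.2] (PySem.Set.ofList [tr.2]) with
      | none => false
      | some vis => decide ((vis.length : Int) = n)

-- ===== PORT B =====
-- the pair of child slots of node i that are not -1 ('[leftChild[i], rightChild[i]] sans -1')
def vbtChildren (L R : List Int) (i : Int) : List Int :=
  [PySem.List.pyGetD L i 0, PySem.List.pyGetD R i 0].filter (fun c => decide (c ≠ -1))

def validateBinaryTreeNodes2_alt (n : Int) (leftChild : List Int) (rightChild : List Int) : Bool :=
  if leftChild = [] ∨ rightChild = [] ∨ leftChild.length ≠ rightChild.length then false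
  else
    let kids := ((PySem.List.slice leftChild none (some n)).zip (PySem.List.slice rightChild none (some n))).flatMap
      (fun p => [p.1, p.2].filter (fun c => decide (c ≠ -1)))
    if (kids.length : Int) ≠ n - 1 ∨ ((PySem.Set.ofList kids).length : Int) ≠ n - 1 then false
    else
      let root := PySem.Int.floordiv (n * (n - 1)) 2 - kids.sum
      let reach := (PySem.List.pyRange 0 n 1).foldl
        (fun (s : PySem.Set Int) _ =>
          PySem.Set.union s (PySem.Set.ofList (s.flatMap (vbtChildren leftChild rightChild))))
        (PySem.Set.ofList [root])
      decide ((reach.length : Int) = n)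

-- ===== PRECONDITION & SPEC =====
-- Pre_ excludes malformed inputs — n differing from the (equal, nonzero) array lengths, or child
-- values outside {-1} ∪ [0,n) — on which A may raise IndexError or return values shaped by its
-- accidental scan of range(n) over an ill-matched child set.
def Pre_validateBinaryTreeNodes2 (n : Int) (leftChild : List Int) (rightChild : List Int) : Prop :=
  (leftChild = [] ∨ rightChild = [] ∨ leftChild.length ≠ rightChild.length) ∨
  (n = (leftChild.length : Int) ∧ leftChild.length = rightChild.length ∧
    ∀ c ∈ leftChild ++ rightChild, c = -1 ∨ (0 ≤ c ∧ c < n))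
instance (n : Int) (leftChild : List Int) (rightChild : List Int) : Decidable (Pre_validateBinaryTreeNodes2 n leftChild rightChild) := by unfold Pre_validateBinaryTreeNodes2; infer_instance

def pvWitness_validateBinaryTreeNodes2 : Int × List Int × List Int := (3, [1, -1, -1], [2, -1, -1])

def Spec_validateBinaryTreeNodes2 (n : Int) (leftChild : List Int) (rightChild : List Int) (out : Bool) : Prop := out = validateBinaryTreeNodes2_alt n leftChild rightChild
instance (n : Int) (leftChild : List Int) (rightChild : List Int) (out : Bool) : Decidable (Spec_validateBinaryTreeNodes2 n leftChild rightChild out) := by unfold Spec_validateBinaryTreeNodes2; infer_instance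

-- ===== CLAIM (what is proved, stated in full; the proofs are below) =====
def Claim_equal_validateBinaryTreeNodes2 : Prop := ∀ (n : Int) (leftChild : List Int) (rightChild : List Int), Dom_validateBinaryTreeNodes2 n leftChild rightChild → Pre_validateBinaryTreeNodes2 n leftChild rightChild → Spec_validateBinaryTreeNodes2 n leftChild rightChild (validateBinaryTreeNodes2 n leftChild rightChild)

-- ===== LEMMAS AND PROOFS =====

-- well-formed inputs: n matches the equal lengths and every child slot is -1 or a node id
def vbtWF (n : Int) (L R : List Int) : Prop :=
  n = (L.length : Int) ∧ L.length = R.length ∧ ∀ c ∈ L ++ R, c = -1 ∨ (0 ≤ c ∧ c < n)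

-- all declared child slots, node by node
def kidsOf (n : Int) (L R : List Int) : List Int :=
  (PySem.List.pyRange 0 n 1).flatMap (vbtChildren L R)

-- reachability through child slots
inductive VReach (L R : List Int) (r : Int) : Int → Prop
  | refl : VReach L R r r
  | step {i c : Int} : VReach L R r i → c ∈ vbtChildren L R i → VReach L R r c

-- the common characterisation both programs are proved equivalent to
def vbtPhi (n : Int) (L R : List Int) : Prop :=
  ∃ r, 0 ≤ r ∧ r < n ∧ r ∉ kidsOf n L R ∧ (kidsOf n L R).Nodup ∧
    ((kidsOf n L R).length : Int) = n - 1 ∧ ∀ v, 0 ≤ v → v < n → VReach L R r v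


theorem vbt_children_mem {L R : List Int} {i c : Int} :
    c ∈ vbtChildren L R i ↔
      ((c = PySem.List.pyGetD L i 0 ∨ c = PySem.List.pyGetD R i 0) ∧ c ≠ -1) := by
  simp only [vbtChildren, List.mem_filter, List.mem_cons, decide_eq_true_eq,
    List.not_mem_nil, or_false]

theorem mem_kidsOf {n : Int} {L R : List Int} {x : Int} :
    x ∈ kidsOf n L R ↔ ∃ i, 0 ≤ i ∧ i < n ∧ x ∈ vbtChildren L R i := by
  simp only [kidsOf, List.mem_flatMap, PySem.List.mem_pyRange_one]
  constructor
  · rintro ⟨i, ⟨h1, h2⟩, h3⟩; exact ⟨i, h1, h2, h3⟩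
  · rintro ⟨i, h1, h2, h3⟩; exact ⟨i, ⟨h1, h2⟩, h3⟩

theorem vbt_children_sub {n : Int} {L R : List Int} (hWF : vbtWF n L R) {i c : Int}
    (hi0 : 0 ≤ i) (hin : i < n) (hc : c ∈ vbtChildren L R i) : (0 ≤ c ∧ c < n) ∧ c ∈ L ++ R := by
  obtain ⟨hn, hlen, hdom⟩ := hWF
  have hiL : PySem.Raise.InRange L.length i := ⟨by omega, by omega⟩
  have hiR : PySem.Raise.InRange R.length i := ⟨by omega, by omega⟩
  rcases vbt_children_mem.mp hc with ⟨hor, hne⟩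
  have hmem : c ∈ L ++ R := by
    rcases hor with h | h
    · exact List.mem_append_left _ (h ▸ PySem.List.pyGetD_mem L 0 hiL)
    · exact List.mem_append_right _ (h ▸ PySem.List.pyGetD_mem R 0 hiR)
  rcases hdom c hmem with h | h
  · exact absurd h hne
  · exact ⟨h, hmem⟩

theorem kids_range {n : Int} {L R : List Int} (hWF : vbtWF n L R) {x : Int}
    (hx : x ∈ kidsOf n L R) : (0 ≤ x ∧ x < n) ∧ x ∈ L ++ R := by
  rcases mem_kidsOf.mp hx with ⟨i, h1, h2, h3⟩
  exact vbt_children_sub hWF h1 h2 h3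

theorem mem_kids_of_mem_append {n : Int} {L R : List Int} (hWF : vbtWF n L R) {x : Int}
    (hx : x ∈ L ++ R) (hne : x ≠ -1) : x ∈ kidsOf n L R := by
  obtain ⟨hn, hlen, _⟩ := hWF
  rcases List.mem_append.mp hx with h | h
  · obtain ⟨k, hk, hget⟩ := List.mem_iff_getElem.mp h
    refine mem_kidsOf.mpr ⟨(k : Int), by omega, by omega, ?_⟩
    refine vbt_children_mem.mpr ⟨Or.inl ?_, hne⟩
    rw [PySem.List.pyGetD_natCast, List.getD_eq_getElem?_getD, List.getElem?_eq_getElem hk, hget,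
      Option.getD_some]
  · obtain ⟨k, hk, hget⟩ := List.mem_iff_getElem.mp h
    refine mem_kidsOf.mpr ⟨(k : Int), by omega, by omega, ?_⟩
    refine vbt_children_mem.mpr ⟨Or.inr ?_, hne⟩
    rw [PySem.List.pyGetD_natCast, List.getD_eq_getElem?_getD, List.getElem?_eq_getElem hk, hget,
      Option.getD_some]

theorem reach_range {n : Int} {L R : List Int} (hWF : vbtWF n L R) {r v : Int}
    (hr0 : 0 ≤ r) (hrn : r < n) (h : VReach L R r v) : 0 ≤ v ∧ v < n := by
  induction h with
  | refl => exact ⟨hr0, hrn⟩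
  | step _ hc ih => exact (vbt_children_sub hWF ih.1 ih.2 hc).1

theorem nodup_length_le_n {n : Int} (P : List Int) (hnd : P.Nodup)
    (hsub : ∀ v ∈ P, 0 ≤ v ∧ v < n) : P.length ≤ n.toNat := by
  have hsubl : P ⊆ PySem.List.pyRange 0 n 1 := fun v hv =>
    PySem.List.mem_pyRange_one.mpr ⟨(hsub v hv).1, (hsub v hv).2⟩
  have := (hnd.subperm hsubl).length_le
  rw [PySem.List.length_pyRange_one] at this
  omega

theorem ofList_len_eq_iff (xs : List Int) :
    (PySem.Set.ofList xs).length = xs.length ↔ xs.Nodup := by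
  induction xs using List.reverseRecOn with
  | nil => simp [PySem.Set.ofList_nil]
  | append_singleton xs x ih =>
    rw [PySem.Set.ofList_append_singleton]
    by_cases hx : x ∈ xs
    · have hadd : PySem.Set.add (PySem.Set.ofList xs) x = PySem.Set.ofList xs :=
        PySem.Set.add_of_mem ((PySem.Set.mem_ofList _ _).mpr hx)
      rw [hadd]
      have h1 := PySem.Set.length_ofList_le xs
      simp only [List.length_append, List.length_singleton]
      constructor
      · intro h; omega
      · intro h
        exact absurd rfl ((List.nodup_append.mp h).2.2 x hx x (List.mem_singleton_self x))
    · have hadd : PySem.Set.add (PySem.Set.ofList xs) x = PySem.Set.ofList xs ++ [x] :=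
        PySem.Set.add_of_not_mem (fun hc => hx ((PySem.Set.mem_ofList _ _).mp hc))
      rw [hadd]
      simp only [List.length_append, List.length_singleton]
      constructor
      · intro h
        have := ih.mp (by omega)
        exact List.Nodup.append this (List.nodup_singleton x)
          (List.disjoint_left.mpr fun a ha hb => hx (by rwa [List.mem_singleton.mp hb] at ha))
      · intro h
        have hnd := (List.nodup_append.mp h).1
        rw [ih.mpr hnd]

theorem sum_pyRange_gauss : ∀ n : Int, 0 ≤ n → 2 * (PySem.List.pyRange 0 n 1).sum = n * (n - 1) := by
  intro n hn
  induction n, hn using Int.le_induction with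
  | base => simp [PySem.List.pyRange_one_eq_nil]
  | succ m hm ih =>
    rw [PySem.List.pyRange_one_succ_right (by omega)]
    rw [List.sum_append, List.sum_singleton, mul_add, ih]
    ring

theorem foldl_const_iterate {α β : Type} (f : α → α) :
    ∀ (l : List β) (init : α), l.foldl (fun s _ => f s) init = f^[l.length] init := by
  intro l
  induction l with
  | nil => intro init; rfl
  | cons x xs ih =>
    intro init
    rw [List.foldl_cons, ih, List.length_cons, Function.iterate_succ_apply]

theorem rootloop (S : PySem.Set Int) :
    ∀ (l : List Int) (init : Int × Int),
      (l.foldl (fun (p : Int × Int) i => if i ∉ S then (p.1 + 1, i) else p) init).1 =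
          init.1 + (l.countP (fun i => decide (i ∉ S)) : Int) ∧
      (l.countP (fun i => decide (i ∉ S)) = 0 →
        l.foldl (fun (p : Int × Int) i => if i ∉ S then (p.1 + 1, i) else p) init = init) ∧
      (1 ≤ l.countP (fun i => decide (i ∉ S)) →
        (l.foldl (fun (p : Int × Int) i => if i ∉ S then (p.1 + 1, i) else p) init).2 ∈ l ∧
        (l.foldl (fun (p : Int × Int) i => if i ∉ S then (p.1 + 1, i) else p) init).2 ∉ S) := by
  intro l
  induction l using List.reverseRecOn with
  | nil => intro init; refine ⟨by simp, fun _ => rfl, by simp⟩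
  | append_singleton xs x ih =>
    intro init
    obtain ⟨ih1, ih2, ih3⟩ := ih init
    rw [List.foldl_append, List.countP_append]
    by_cases hx : x ∉ S
    · simp only [List.foldl_cons, List.foldl_nil, if_pos hx, List.countP_singleton,
        decide_eq_true hx, if_pos]
      refine ⟨by push_cast; omega, by omega, fun _ => ⟨List.mem_append_right _ (List.mem_singleton_self x), hx⟩⟩
    · simp only [List.foldl_cons, List.foldl_nil, if_neg hx]
      have hc : (List.countP (fun i => decide (i ∉ S)) [x]) = 0 := by
        simp [hx]
      rw [hc]
      refine ⟨by simpa using ih1, by simpa using ih2, ?_⟩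
      intro h1
      have := ih3 (by omega)
      exact ⟨List.mem_append_left _ this.1, this.2⟩


-- ---- BFS invariant ----

structure BfsInv (n r : Int) (L R q vis P : List Int) : Prop where
  hvis : vis = r :: P.flatMap (vbtChildren L R)
  hnd : vis.Nodup
  hrange : ∀ v ∈ vis, 0 ≤ v ∧ v < n
  hcover : ∀ v ∈ vis, v ∈ P ∨ v ∈ q
  hqv : ∀ v ∈ q, v ∈ vis
  hpv : ∀ v ∈ P, v ∈ vis
  hqnd : q.Nodup
  hpnd : P.Nodup
  hqp : ∀ v ∈ q, v ∉ P
  hreach : ∀ v ∈ vis, VReach L R r v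

theorem children_split (L R : List Int) (curr : Int) :
    vbtChildren L R curr =
      (if PySem.List.pyGetD L curr 0 = -1 then [] else [PySem.List.pyGetD L curr 0]) ++
      (if PySem.List.pyGetD R curr 0 = -1 then [] else [PySem.List.pyGetD R curr 0]) := by
  unfold vbtChildren
  by_cases h1 : PySem.List.pyGetD L curr 0 = -1 <;> by_cases h2 : PySem.List.pyGetD R curr 0 = -1 <;>
    simp [h1, h2]

theorem kids_pieces_nodup {n : Int} {L R : List Int} (hkid : (kidsOf n L R).Nodup)
    {i : Int} (h0 : 0 ≤ i) (h1 : i < n) : (vbtChildren L R i).Nodup :=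
  (List.nodup_flatMap.mp hkid).1 i (PySem.List.mem_pyRange_one.mpr ⟨h0, h1⟩)

theorem kids_pieces_disjoint {n : Int} {L R : List Int} (hkid : (kidsOf n L R).Nodup)
    {i j c : Int} (hi0 : 0 ≤ i) (hin : i < n) (hj0 : 0 ≤ j) (hjn : j < n) (hij : i ≠ j)
    (hci : c ∈ vbtChildren L R i) (hcj : c ∈ vbtChildren L R j) : False := by
  have hp := (List.nodup_flatMap.mp hkid).2
  have hsym : Symmetric (Function.onFun List.Disjoint (vbtChildren L R)) := by
    intro a b h; exact List.Disjoint.symm h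
  have := hp.forall hsym (PySem.List.mem_pyRange_one.mpr ⟨hi0, hin⟩)
    (PySem.List.mem_pyRange_one.mpr ⟨hj0, hjn⟩) hij
  exact this hci hcj

theorem bfs_checks {n r : Int} {L R : List Int} {curr : Int} {rest vis P : List Int}
    (hWF : vbtWF n L R) (hkid : (kidsOf n L R).Nodup) (hroot : r ∉ kidsOf n L R)
    (inv : BfsInv n r L R (curr :: rest) vis P) :
    ¬(PySem.List.pyGetD L curr 0 ≠ -1 ∧ PySem.List.pyGetD L curr 0 ∈ vis) ∧
    ¬(PySem.List.pyGetD R curr 0 ≠ -1 ∧ PySem.List.pyGetD R curr 0 ∈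
        (if PySem.List.pyGetD L curr 0 ≠ -1 then PySem.Set.add vis (PySem.List.pyGetD L curr 0) else vis)) := by
  have hcv : curr ∈ vis := inv.hqv curr (List.mem_cons_self ..)
  obtain ⟨hc0, hcn⟩ := inv.hrange curr hcv
  have hcurrP : curr ∉ P := inv.hqp curr (List.mem_cons_self ..)
  have key : ∀ x, x ∈ vbtChildren L R curr → x ∉ vis := by
    intro x hx hxv
    have hxkids : x ∈ kidsOf n L R := mem_kidsOf.mpr ⟨curr, hc0, hcn, hx⟩
    rw [inv.hvis] at hxv
    rcases List.mem_cons.mp hxv with hxr | hxf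
    · exact hroot (hxr ▸ hxkids)
    · obtain ⟨p, hpP, hpc⟩ := List.mem_flatMap.mp hxf
      obtain ⟨hp0, hpn⟩ := inv.hrange p (inv.hpv p hpP)
      have hpne : p ≠ curr := fun h => hcurrP (h ▸ hpP)
      exact kids_pieces_disjoint hkid hp0 hpn hc0 hcn hpne hpc hx
  refine ⟨fun ⟨h1, h2⟩ => key _ (vbt_children_mem.mpr ⟨Or.inl rfl, h1⟩) h2, ?_⟩
  rintro ⟨h1, h2⟩
  by_cases hl : PySem.List.pyGetD L curr 0 ≠ -1
  · rw [if_pos hl] at h2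
    rcases (PySem.Set.mem_add _ _ _).mp h2 with h | h
    · exact key _ (vbt_children_mem.mpr ⟨Or.inr rfl, h1⟩) h
    · have hnd := kids_pieces_nodup hkid hc0 hcn
      rw [children_split, if_neg hl, if_neg h1] at hnd
      simp only [List.singleton_append, List.nodup_cons, List.mem_singleton] at hnd
      exact hnd.1 h.symm
  · rw [if_neg hl] at h2
    exact key _ (vbt_children_mem.mpr ⟨Or.inr rfl, h1⟩) h2

theorem bfs_step {n r : Int} {L R : List Int} {curr : Int} {rest vis P : List Int}
    (hWF : vbtWF n L R) (hr0 : 0 ≤ r) (hrn : r < n)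
    (inv : BfsInv n r L R (curr :: rest) vis P)
    (C1 : ¬(PySem.List.pyGetD L curr 0 ≠ -1 ∧ PySem.List.pyGetD L curr 0 ∈ vis))
    (C2 : ¬(PySem.List.pyGetD R curr 0 ≠ -1 ∧ PySem.List.pyGetD R curr 0 ∈
        (if PySem.List.pyGetD L curr 0 ≠ -1 then PySem.Set.add vis (PySem.List.pyGetD L curr 0) else vis))) :
    (∀ fuel, bfsA L R (fuel + 1) (curr :: rest) vis =
       bfsA L R fuel (rest ++ vbtChildren L R curr) (vis ++ vbtChildren L R curr)) ∧
    BfsInv n r L R (rest ++ vbtChildren L R curr) (vis ++ vbtChildren L R curr) (P ++ [curr]) := by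
  have hcv : curr ∈ vis := inv.hqv curr (List.mem_cons_self ..)
  obtain ⟨hc0, hcn⟩ := inv.hrange curr hcv
  have hcurrP : curr ∉ P := inv.hqp curr (List.mem_cons_self ..)
  have hC1' : PySem.List.pyGetD L curr 0 ≠ -1 → PySem.List.pyGetD L curr 0 ∉ vis :=
    fun h hm => C1 ⟨h, hm⟩
  have hC2' : PySem.List.pyGetD R curr 0 ≠ -1 → PySem.List.pyGetD R curr 0 ∉
      (if PySem.List.pyGetD L curr 0 ≠ -1 then PySem.Set.add vis (PySem.List.pyGetD L curr 0) else vis) :=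
    fun h hm => C2 ⟨h, hm⟩
  have hrcvis : PySem.List.pyGetD R curr 0 ≠ -1 → PySem.List.pyGetD R curr 0 ∉ vis := by
    intro h hm
    refine hC2' h ?_
    by_cases hl : PySem.List.pyGetD L curr 0 ≠ -1
    · rw [if_pos hl]; exact (PySem.Set.mem_add _ _ _).mpr (Or.inl hm)
    · rwa [if_neg hl]
  have hrclc : PySem.List.pyGetD R curr 0 ≠ -1 → PySem.List.pyGetD L curr 0 ≠ -1 →
      PySem.List.pyGetD R curr 0 ≠ PySem.List.pyGetD L curr 0 := by
    intro h hl he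
    exact hC2' h (by rw [if_pos hl]; exact (PySem.Set.mem_add _ _ _).mpr (Or.inr he))
  have hvis1 : (if PySem.List.pyGetD L curr 0 ≠ -1 then PySem.Set.add vis (PySem.List.pyGetD L curr 0) else vis) =
      vis ++ (if PySem.List.pyGetD L curr 0 = -1 then [] else [PySem.List.pyGetD L curr 0]) := by
    by_cases hl : PySem.List.pyGetD L curr 0 = -1
    · simp [hl]
    · rw [if_pos hl, if_neg hl, PySem.Set.add_of_not_mem (hC1' hl)]
  have hq1 : (if PySem.List.pyGetD L curr 0 ≠ -1 then rest ++ [PySem.List.pyGetD L curr 0] else rest) =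
      rest ++ (if PySem.List.pyGetD L curr 0 = -1 then [] else [PySem.List.pyGetD L curr 0]) := by
    by_cases hl : PySem.List.pyGetD L curr 0 = -1
    · simp [hl]
    · rw [if_pos hl, if_neg hl]
  have hrcvis1 : PySem.List.pyGetD R curr 0 ≠ -1 → PySem.List.pyGetD R curr 0 ∉
      (vis ++ (if PySem.List.pyGetD L curr 0 = -1 then [] else [PySem.List.pyGetD L curr 0])) := by
    intro h hm
    rcases List.mem_append.mp hm with hm | hm
    · exact hrcvis h hm
    · by_cases hl : PySem.List.pyGetD L curr 0 = -1
      · rw [if_pos hl] at hm; exact List.not_mem_nil hm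
      · rw [if_neg hl] at hm
        exact hrclc h hl (List.mem_singleton.mp hm)
  have hsplit := children_split L R curr
  have hveq : (if PySem.List.pyGetD R curr 0 ≠ -1 then
        PySem.Set.add (vis ++ (if PySem.List.pyGetD L curr 0 = -1 then [] else [PySem.List.pyGetD L curr 0])) (PySem.List.pyGetD R curr 0)
      else vis ++ (if PySem.List.pyGetD L curr 0 = -1 then [] else [PySem.List.pyGetD L curr 0])) =
      vis ++ vbtChildren L R curr := by
    rw [hsplit]
    by_cases hr2 : PySem.List.pyGetD R curr 0 = -1
    · simp [hr2]
    · rw [if_pos hr2, if_neg hr2, PySem.Set.add_of_not_mem (hrcvis1 hr2), List.append_assoc]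
  have hqeq : (if PySem.List.pyGetD R curr 0 ≠ -1 then
        (rest ++ (if PySem.List.pyGetD L curr 0 = -1 then [] else [PySem.List.pyGetD L curr 0])) ++ [PySem.List.pyGetD R curr 0]
      else rest ++ (if PySem.List.pyGetD L curr 0 = -1 then [] else [PySem.List.pyGetD L curr 0])) =
      rest ++ vbtChildren L R curr := by
    rw [hsplit]
    by_cases hr2 : PySem.List.pyGetD R curr 0 = -1
    · simp [hr2]
    · rw [if_pos hr2, if_neg hr2, List.append_assoc]
  -- facts about the fresh children
  have hcsnv : ∀ x ∈ vbtChildren L R curr, x ∉ vis := by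
    intro x hx
    rcases vbt_children_mem.mp hx with ⟨hor, hne⟩
    rcases hor with h | h
    · exact h ▸ hC1' (h ▸ hne)
    · exact h ▸ hrcvis (h ▸ hne)
  have hcsnd : (vbtChildren L R curr).Nodup := by
    rw [hsplit]
    by_cases hl : PySem.List.pyGetD L curr 0 = -1 <;>
      by_cases hr2 : PySem.List.pyGetD R curr 0 = -1 <;>
        simp [hl, hr2]
    exact fun he => hrclc hr2 hl he.symm
  have hcsr : ∀ x ∈ vbtChildren L R curr, 0 ≤ x ∧ x < n :=
    fun x hx => (vbt_children_sub hWF hc0 hcn hx).1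
  have hcsreach : ∀ x ∈ vbtChildren L R curr, VReach L R r x :=
    fun x hx => VReach.step (inv.hreach curr hcv) hx
  have hrestv : ∀ v ∈ rest, v ∈ vis := fun v hv => inv.hqv v (List.mem_cons_of_mem _ hv)
  have hcurrrest : curr ∉ rest := (List.nodup_cons.mp inv.hqnd).1
  constructor
  · intro fuel
    simp only [bfsA]
    rw [if_neg C1, hvis1, hq1, if_neg (by rw [← hvis1]; exact C2), hveq, hqeq]
  · refine ⟨?_, ?_, ?_, ?_, ?_, ?_, ?_, ?_, ?_, ?_⟩
    · rw [inv.hvis, List.flatMap_append, List.flatMap_singleton, List.cons_append]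
    · exact List.Nodup.append inv.hnd hcsnd (List.disjoint_left.mpr fun a ha hb => hcsnv a hb ha)
    · intro v hv
      rcases List.mem_append.mp hv with h | h
      · exact inv.hrange v h
      · exact hcsr v h
    · intro v hv
      rcases List.mem_append.mp hv with h | h
      · rcases inv.hcover v h with h' | h'
        · exact Or.inl (List.mem_append_left _ h')
        · rcases List.mem_cons.mp h' with h'' | h''
          · exact Or.inl (List.mem_append_right _ (h'' ▸ List.mem_singleton_self _))
          · exact Or.inr (List.mem_append_left _ h'')
      · exact Or.inr (List.mem_append_right _ h)
    · intro v hv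
      rcases List.mem_append.mp hv with h | h
      · exact List.mem_append_left _ (hrestv v h)
      · exact List.mem_append_right _ h
    · intro v hv
      rcases List.mem_append.mp hv with h | h
      · exact List.mem_append_left _ (inv.hpv v h)
      · exact List.mem_append_left _ (List.mem_singleton.mp h ▸ hcv)
    · refine List.Nodup.append ((List.nodup_cons.mp inv.hqnd).2) hcsnd
        (List.disjoint_left.mpr fun a ha hb => hcsnv a hb (hrestv a ha))
    · refine List.Nodup.append inv.hpnd (List.nodup_singleton _)
        (List.disjoint_left.mpr fun a ha hb => (List.mem_singleton.mp hb ▸ hcurrP) ha)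
    · intro v hv hvP
      rcases List.mem_append.mp hv with h | h
      · rcases List.mem_append.mp hvP with h' | h'
        · exact inv.hqp v (List.mem_cons_of_mem _ h) h'
        · exact hcurrrest (List.mem_singleton.mp h' ▸ h)
      · rcases List.mem_append.mp hvP with h' | h'
        · exact hcsnv v h (inv.hpv v h')
        · exact hcsnv v h (List.mem_singleton.mp h' ▸ hcv)
    · intro v hv
      rcases List.mem_append.mp hv with h | h
      · exact inv.hreach v h
      · exact hcsreach v h

theorem bfs_success {n r : Int} {L R : List Int} (hWF : vbtWF n L R) (hr0 : 0 ≤ r) (hrn : r < n)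
    (hkid : (kidsOf n L R).Nodup) (hroot : r ∉ kidsOf n L R) :
    ∀ (fuel : Nat) (q vis P : List Int), BfsInv n r L R q vis P →
      n.toNat + 1 ≤ fuel + P.length →
      ∃ vis', bfsA L R fuel q vis = some vis' ∧ vis'.Nodup ∧ (∀ x, x ∈ vis' ↔ VReach L R r x) := by
  intro fuel
  induction fuel with
  | zero =>
    intro q vis P inv hfuel
    have hple : P.length ≤ n.toNat :=
      nodup_length_le_n P inv.hpnd (fun v hv => inv.hrange v (inv.hpv v hv))
    omega
  | succ fuel ih =>
    intro q vis P inv hfuel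
    match q with
    | [] =>
      refine ⟨vis, rfl, inv.hnd, fun x => ⟨inv.hreach x, ?_⟩⟩
      intro hx
      induction hx with
      | refl => rw [inv.hvis]; exact List.mem_cons_self ..
      | step hri hc ihr =>
        rename_i i c
        have hiP : i ∈ P := by
          rcases inv.hcover i ihr with h | h
          · exact h
          · exact absurd h (List.not_mem_nil)
        rw [inv.hvis]
        exact List.mem_cons_of_mem _ (List.mem_flatMap.mpr ⟨i, hiP, hc⟩)
    | curr :: rest =>
      obtain ⟨C1, C2⟩ := bfs_checks hWF hkid hroot inv
      obtain ⟨heq, inv'⟩ := bfs_step hWF hr0 hrn inv C1 C2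
      rw [heq fuel]
      refine ih _ _ _ inv' ?_
      rw [List.length_append, List.length_singleton]
      omega

theorem bfs_sound {n r : Int} {L R : List Int} (hWF : vbtWF n L R) (hr0 : 0 ≤ r) (hrn : r < n) :
    ∀ (fuel : Nat) (q vis P : List Int), BfsInv n r L R q vis P →
      ∀ vis', bfsA L R fuel q vis = some vis' →
      ∃ P' : List Int, P'.Nodup ∧ (∀ x, x ∈ P' ↔ x ∈ vis') ∧ vis' = r :: P'.flatMap (vbtChildren L R) ∧
        vis'.Nodup ∧ (∀ v ∈ vis', 0 ≤ v ∧ v < n) ∧ (∀ v ∈ vis', VReach L R r v) := by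
  intro fuel
  induction fuel with
  | zero => intro q vis P inv vis' h; exact absurd h (by simp [bfsA])
  | succ fuel ih =>
    intro q vis P inv vis' h
    match q with
    | [] =>
      have hv : vis = vis' := by simpa [bfsA] using h
      subst hv
      refine ⟨P, inv.hpnd, fun x => ⟨fun hx => inv.hpv x hx, fun hx => ?_⟩,
        inv.hvis, inv.hnd, inv.hrange, inv.hreach⟩
      rcases inv.hcover x hx with h | h
      · exact h
      · exact absurd h (List.not_mem_nil)
    | curr :: rest =>
      by_cases C1 : PySem.List.pyGetD L curr 0 ≠ -1 ∧ PySem.List.pyGetD L curr 0 ∈ vis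
      · exact absurd h (by simp [bfsA, C1])
      by_cases C2 : PySem.List.pyGetD R curr 0 ≠ -1 ∧ PySem.List.pyGetD R curr 0 ∈
          (if PySem.List.pyGetD L curr 0 ≠ -1 then PySem.Set.add vis (PySem.List.pyGetD L curr 0) else vis)
      · exact absurd h (by simp only [bfsA, if_neg C1]; rw [if_pos C2]; simp)
      obtain ⟨heq, inv'⟩ := bfs_step hWF hr0 hrn inv C1 C2
      rw [heq fuel] at h
      exact ih _ _ _ inv' vis' h

-- ---- saturation ----

def satStep (L R : List Int) (s : PySem.Set Int) : PySem.Set Int :=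
  PySem.Set.union s (PySem.Set.ofList (s.flatMap (vbtChildren L R)))

theorem satStep_eq_append (L R : List Int) (s : PySem.Set Int) :
    ∃ t, satStep L R s = s ++ t := by
  exact ⟨_, PySem.Set.update_eq_append_filter s (PySem.Set.ofList (s.flatMap (vbtChildren L R)))⟩

theorem mem_satStep {L R : List Int} {s : PySem.Set Int} {x : Int} :
    x ∈ satStep L R s ↔ x ∈ s ∨ ∃ i ∈ s, x ∈ vbtChildren L R i := by
  unfold satStep
  rw [PySem.Set.mem_union]
  constructor
  · rintro (h | h)
    · exact Or.inl h
    · exact Or.inr (List.mem_flatMap.mp ((PySem.Set.mem_ofList _ _).mp h))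
  · rintro (h | h)
    · exact Or.inl h
    · exact Or.inr ((PySem.Set.mem_ofList _ _).mpr (List.mem_flatMap.mpr h))

def satQ (n r : Int) (L R : List Int) (s : PySem.Set Int) : Prop :=
  s.Nodup ∧ (∀ v ∈ s, 0 ≤ v ∧ v < n) ∧ r ∈ s ∧ ∀ v ∈ s, VReach L R r v

theorem satStep_inv {n r : Int} {L R : List Int} (hWF : vbtWF n L R)
    {s : PySem.Set Int} (hq : satQ n r L R s) : satQ n r L R (satStep L R s) := by
  obtain ⟨h1, h2, h3, h4⟩ := hq
  refine ⟨PySem.Set.nodup_union _ _ h1, ?_, mem_satStep.mpr (Or.inl h3), ?_⟩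
  · intro v hv
    rcases mem_satStep.mp hv with h | ⟨i, hi, hc⟩
    · exact h2 v h
    · exact (vbt_children_sub hWF (h2 i hi).1 (h2 i hi).2 hc).1
  · intro v hv
    rcases mem_satStep.mp hv with h | ⟨i, hi, hc⟩
    · exact h4 v h
    · exact VReach.step (h4 i hi) hc

theorem sat_iterate_inv {n r : Int} {L R : List Int} (hWF : vbtWF n L R)
    {s0 : PySem.Set Int} (h0 : satQ n r L R s0) :
    ∀ k, satQ n r L R ((satStep L R)^[k] s0) := by
  intro k
  induction k with
  | zero => exact h0
  | succ k ih => rw [Function.iterate_succ_apply']; exact satStep_inv hWF ih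

theorem sat_growth {L R : List Int} (s0 : PySem.Set Int) :
    ∀ k, (∀ j, j < k → (satStep L R)^[j+1] s0 ≠ (satStep L R)^[j] s0) →
      k + s0.length ≤ ((satStep L R)^[k] s0).length := by
  intro k
  induction k with
  | zero => intro _; simp
  | succ k ih =>
    intro h
    have h1 := ih (fun j hj => h j (by omega))
    have hne := h k (by omega)
    rw [Function.iterate_succ_apply'] at hne ⊢
    obtain ⟨t, ht⟩ := satStep_eq_append L R ((satStep L R)^[k] s0)
    rw [ht] at hne ⊢
    rcases t with _ | ⟨a, t⟩
    · simp at hne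
    · rw [List.length_append]
      simp only [List.length_cons]
      omega

theorem sat_fix {n r : Int} {L R : List Int} (hWF : vbtWF n L R)
    (hr0 : 0 ≤ r) (hrn : r < n) :
    satStep L R ((satStep L R)^[n.toNat] (PySem.Set.ofList [r])) =
      (satStep L R)^[n.toNat] (PySem.Set.ofList [r]) := by
  have hs0 : PySem.Set.ofList [r] = [r] :=
    PySem.Set.ofList_eq_self_of_nodup _ (List.nodup_singleton r)
  have h0 : satQ n r L R (PySem.Set.ofList [r]) := by
    rw [hs0]
    exact ⟨List.nodup_singleton r, fun v hv => by
      rw [List.mem_singleton.mp hv]; exact ⟨hr0, hrn⟩,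
      List.mem_singleton_self r, fun v hv => by
        rw [List.mem_singleton.mp hv]; exact VReach.refl⟩
  by_cases hfix : ∃ j, j < n.toNat ∧ (satStep L R)^[j+1] (PySem.Set.ofList [r]) = (satStep L R)^[j] (PySem.Set.ofList [r])
  · obtain ⟨j, hj, hfj⟩ := hfix
    have hstab : ∀ m, (satStep L R)^[m] ((satStep L R)^[j] (PySem.Set.ofList [r])) =
        (satStep L R)^[j] (PySem.Set.ofList [r]) := by
      intro m
      refine Function.iterate_fixed ?_ m
      rw [← Function.iterate_succ_apply' (satStep L R) j]; exact hfj
    have hN : (satStep L R)^[n.toNat] (PySem.Set.ofList [r]) =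
        (satStep L R)^[j] (PySem.Set.ofList [r]) := by
      have : n.toNat = (n.toNat - j) + j := by omega
      rw [this, Function.iterate_add_apply, hstab]
    rw [hN]
    rw [← Function.iterate_succ_apply' (satStep L R) j]; exact hfj
  · push_neg at hfix
    have hg := sat_growth (L := L) (R := R) (PySem.Set.ofList [r]) n.toNat hfix
    have hq := sat_iterate_inv hWF h0 n.toNat
    have hle := nodup_length_le_n _ hq.1 hq.2.1
    rw [hs0] at hg hle
    simp only [List.length_singleton] at hg
    omega

theorem sat_complete {n r : Int} {L R : List Int} {s : PySem.Set Int}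
    (hfix : satStep L R s = s) (hr : r ∈ s) {v : Int} (h : VReach L R r v) : v ∈ s := by
  induction h with
  | refl => exact hr
  | step _ hc ih => rw [← hfix]; exact mem_satStep.mpr (Or.inr ⟨_, ih, hc⟩)

-- ---- root counting ----

theorem missing_root {n : Int} {L R : List Int} (hWF : vbtWF n L R) (hn1 : 1 ≤ n)
    (hnd : (kidsOf n L R).Nodup) (hlen : ((kidsOf n L R).length : Int) = n - 1) :
    ∃ r, 0 ≤ r ∧ r < n ∧ r ∉ kidsOf n L R ∧
      (∀ x, 0 ≤ x → x < n → x ≠ r → x ∈ kidsOf n L R) ∧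
      2 * (kidsOf n L R).sum = n * (n - 1) - 2 * r := by
  have hsub : kidsOf n L R ⊆ PySem.List.pyRange 0 n 1 := fun x hx =>
    PySem.List.mem_pyRange_one.mpr ⟨(kids_range hWF hx).1.1, (kids_range hWF hx).1.2⟩
  have hlenN : (kidsOf n L R).length = n.toNat - 1 := by omega
  have hlenR : (PySem.List.pyRange 0 n 1).length = n.toNat := by
    rw [PySem.List.length_pyRange_one]; omega
  -- there is a missing value
  have hex : ∃ r, r ∈ PySem.List.pyRange 0 n 1 ∧ r ∉ kidsOf n L R := by
    by_contra hc
    push_neg at hc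
    have : PySem.List.pyRange 0 n 1 ⊆ kidsOf n L R := fun x hx => hc x hx
    have := ((PySem.List.nodup_pyRange_one 0 n).subperm this).length_le
    omega
  obtain ⟨r, hrR, hrk⟩ := hex
  obtain ⟨hr0, hrn⟩ := PySem.List.mem_pyRange_one.mp hrR
  have hfltnd : ((PySem.List.pyRange 0 n 1).filter (fun x => decide (x ≠ r))).Nodup :=
    (PySem.List.nodup_pyRange_one 0 n).filter _
  have hperm : (PySem.List.pyRange 0 n 1).Perm (r :: (PySem.List.pyRange 0 n 1).filter (fun x => decide (x ≠ r))) := by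
    refine (List.perm_ext_iff_of_nodup (PySem.List.nodup_pyRange_one 0 n) ?_).mpr ?_
    · refine List.nodup_cons.mpr ⟨?_, hfltnd⟩
      intro hr
      simp at hr
    · intro x
      constructor
      · intro hx
        by_cases hxr : x = r
        · exact hxr ▸ List.mem_cons_self ..
        · exact List.mem_cons_of_mem _ (List.mem_filter.mpr ⟨hx, by simpa using hxr⟩)
      · intro hx
        rcases List.mem_cons.mp hx with h | h
        · exact h ▸ hrR
        · exact (List.mem_filter.mp h).1
  have hfltlen : ((PySem.List.pyRange 0 n 1).filter (fun x => decide (x ≠ r))).length = n.toNat - 1 := by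
    have := hperm.length_eq
    simp only [List.length_cons] at this
    omega
  have hkf : kidsOf n L R ⊆ (PySem.List.pyRange 0 n 1).filter (fun x => decide (x ≠ r)) := by
    intro x hx
    refine List.mem_filter.mpr ⟨hsub hx, ?_⟩
    simp only [decide_eq_true_eq]
    intro h; exact hrk (h ▸ hx)
  have hkperm : (kidsOf n L R).Perm ((PySem.List.pyRange 0 n 1).filter (fun x => decide (x ≠ r))) :=
    (hnd.subperm hkf).perm_of_length_le (by omega)
  refine ⟨r, hr0, hrn, hrk, ?_, ?_⟩
  · intro x hx0 hxn hxr
    refine hkperm.mem_iff.mpr (List.mem_filter.mpr ⟨PySem.List.mem_pyRange_one.mpr ⟨hx0, hxn⟩, by simpa using hxr⟩)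
  · have hsum := hperm.sum_eq
    rw [List.sum_cons, ← hkperm.sum_eq] at hsum
    have hg := sum_pyRange_gauss n (by omega)
    omega

-- ---- B's kid list is the canonical one ----

theorem zipflat (g : Int × Int → List Int) :
    ∀ (L R : List Int), L.length = R.length →
      (L.zip R).flatMap g =
        (List.range L.length).flatMap (fun k => g (L.getD k 0, R.getD k 0)) := by
  intro L
  induction L with
  | nil => intro R _; simp
  | cons x L ih =>
    intro R hlen
    match R with
    | [] => simp at hlen
    | y :: R =>
      simp only [List.length_cons] at hlen
      rw [List.zip_cons_cons, List.flatMap_cons, List.length_cons, List.range_succ_eq_map,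
        List.flatMap_cons, List.flatMap_map]
      congr 1
      rw [ih R (by omega)]
      rfl

theorem kidsB_eq {n : Int} {L R : List Int} (hWF : vbtWF n L R) :
    ((PySem.List.slice L none (some n)).zip (PySem.List.slice R none (some n))).flatMap
        (fun p => [p.1, p.2].filter (fun c => decide (c ≠ -1))) = kidsOf n L R := by
  obtain ⟨hn, hlen, _⟩ := hWF
  have hsL : PySem.List.slice L none (some n) = L := by
    rw [PySem.List.slice_to L (by omega)]
    rw [show n.toNat = L.length by omega, List.take_length]
  have hsR : PySem.List.slice R none (some n) = R := by
    rw [PySem.List.slice_to R (by omega)]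
    rw [show n.toNat = R.length by omega, List.take_length]
  rw [hsL, hsR, zipflat _ L R hlen]
  unfold kidsOf
  rw [show (0 : Int) = ((0 : Nat) : Int) by simp, PySem.List.pyRange_one]
  rw [List.flatMap_map]
  have hnn : (n - ((0:Nat) : Int)).toNat = L.length := by omega
  rw [hnn]
  refine List.flatMap_congr ?_ -- pointwise equality of the functions on range
  intro k _
  unfold vbtChildren
  rw [show ((0:Nat) : Int) + (k : Int) = ((k : Nat) : Int) by simp]
  rw [PySem.List.pyGetD_natCast, PySem.List.pyGetD_natCast]
  norm_num

theorem vbt_guard_false {n : Int} {L R : List Int} (h : vbtWF n L R) (hne : L ≠ []) :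
    ¬(L = [] ∨ R = [] ∨ L.length ≠ R.length) := by
  obtain ⟨hn, hlen, _⟩ := h
  rintro (hc | hc | hc)
  · exact hne hc
  · exact hne (List.length_eq_zero_iff.mp (by rw [hlen, hc]; rfl))
  · exact hc hlen

theorem wf_n_pos {n : Int} {L R : List Int} (h : vbtWF n L R) (hne : L ≠ []) : 1 ≤ n := by
  obtain ⟨hn, _, _⟩ := h
  have := List.length_pos_of_ne_nil hne
  omega

-- for in-range values, membership in leftChild+rightChild is membership among the child slots
theorem memS_iff_kids {n : Int} {L R : List Int} (hWF : vbtWF n L R) {i : Int}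
    (h0 : 0 ≤ i) : i ∈ L ++ R ↔ i ∈ kidsOf n L R := by
  constructor
  · intro h; exact mem_kids_of_mem_append hWF h (by omega)
  · intro h; exact (kids_range hWF h).2

-- a nodup list of node ids of full length enumerates all node ids
theorem perm_range_of_full {n : Int} (v : List Int) (hnd : v.Nodup)
    (hr : ∀ x ∈ v, 0 ≤ x ∧ x < n) (hlen : (v.length : Int) = n) :
    v.Perm (PySem.List.pyRange 0 n 1) := by
  refine (hnd.subperm fun x hx =>
    PySem.List.mem_pyRange_one.mpr ⟨(hr x hx).1, (hr x hx).2⟩).perm_of_length_le ?_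
  rw [PySem.List.length_pyRange_one]
  omega

theorem bfs_initial_inv {n r : Int} {L R : List Int} (hr0 : 0 ≤ r) (hrn : r < n) :
    BfsInv n r L R [r] [r] [] := by
  refine ⟨by simp, List.nodup_singleton r, ?_, ?_, ?_, ?_, List.nodup_singleton r, List.nodup_nil, ?_, ?_⟩
  · intro v hv; rw [List.mem_singleton.mp hv]; exact ⟨hr0, hrn⟩
  · intro v hv; exact Or.inr hv
  · intro v hv; exact hv
  · intro v hv; exact absurd hv (List.not_mem_nil)
  · intro v hv; exact fun hc => List.not_mem_nil hc
  · intro v hv; rw [List.mem_singleton.mp hv]; exact VReach.refl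

theorem A_iff_phi (n : Int) (L R : List Int) (hWF : vbtWF n L R) (hne : L ≠ []) :
    validateBinaryTreeNodes2 n L R = true ↔ vbtPhi n L R := by
  have hg := vbt_guard_false hWF hne
  have hn1 := wf_n_pos hWF hne
  obtain ⟨hn, hlen, hdom⟩ := hWF
  have hWF' : vbtWF n L R := ⟨hn, hlen, hdom⟩
  have hunfold : validateBinaryTreeNodes2 n L R =
      (if 1 < ((PySem.List.pyRange 0 n 1).foldl
            (fun (p : Int × Int) i => if i ∉ PySem.Set.ofList (L ++ R) then (p.1 + 1, i) else p) (0, 0)).1 ∨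
          ((PySem.List.pyRange 0 n 1).foldl
            (fun (p : Int × Int) i => if i ∉ PySem.Set.ofList (L ++ R) then (p.1 + 1, i) else p) (0, 0)).1 = 0 then false
       else
         match bfsA L R (L.length + 1)
             [((PySem.List.pyRange 0 n 1).foldl
               (fun (p : Int × Int) i => if i ∉ PySem.Set.ofList (L ++ R) then (p.1 + 1, i) else p) (0, 0)).2]
             (PySem.Set.ofList [((PySem.List.pyRange 0 n 1).foldl
               (fun (p : Int × Int) i => if i ∉ PySem.Set.ofList (L ++ R) then (p.1 + 1, i) else p) (0, 0)).2]) with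
         | none => false
         | some vis => decide ((vis.length : Int) = n)) := by
    simp only [validateBinaryTreeNodes2, if_neg hg]
  rw [hunfold]
  set S := PySem.Set.ofList (L ++ R) with hS
  set tr := (PySem.List.pyRange 0 n 1).foldl
      (fun (p : Int × Int) i => if i ∉ S then (p.1 + 1, i) else p) (0, 0) with htr
  obtain ⟨hfst, _, hpos⟩ := rootloop S (PySem.List.pyRange 0 n 1) (0, 0)
  rw [← htr] at hfst hpos
  have hnotS_iff : ∀ i, 0 ≤ i → (i ∉ S ↔ i ∉ kidsOf n L R) := by
    intro i h0
    rw [hS, not_iff_not]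
    exact (PySem.Set.mem_ofList _ _).trans (memS_iff_kids hWF' h0)
  constructor
  · -- A returns True ⇒ Φ
    intro hA
    by_cases hbad : 1 < tr.1 ∨ tr.1 = 0
    · rw [if_pos hbad] at hA; exact absurd hA (by simp)
    rw [if_neg hbad] at hA
    have htr1 : tr.1 = 1 := by
      rw [hfst] at hbad ⊢
      omega
    have hc1 : 1 ≤ (PySem.List.pyRange 0 n 1).countP (fun i => decide (i ∉ S)) := by
      rw [hfst] at htr1; omega
    obtain ⟨hrmem, hrS⟩ := hpos hc1
    obtain ⟨hr0, hrn⟩ := PySem.List.mem_pyRange_one.mp hrmem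
    have hrk : tr.2 ∉ kidsOf n L R := (hnotS_iff tr.2 hr0).mp hrS
    rcases hbfs : bfsA L R (L.length + 1) [tr.2] (PySem.Set.ofList [tr.2]) with _ | vis
    · rw [hbfs] at hA; exact absurd hA (by simp)
    rw [hbfs] at hA
    have hlenvis : (vis.length : Int) = n := by simpa using hA
    have hofl : PySem.Set.ofList [tr.2] = [tr.2] :=
      PySem.Set.ofList_eq_self_of_nodup _ (List.nodup_singleton _)
    rw [hofl] at hbfs
    obtain ⟨P', hP'nd, hP'v, hvis, hvnd, hvrange, hvreach⟩ :=
      bfs_sound hWF' hr0 hrn (L.length + 1) [tr.2] [tr.2] [] (bfs_initial_inv hr0 hrn) vis hbfs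
    have hvperm : vis.Perm (PySem.List.pyRange 0 n 1) :=
      perm_range_of_full vis hvnd hvrange hlenvis
    have hP'perm : P'.Perm (PySem.List.pyRange 0 n 1) := by
      refine (List.perm_ext_iff_of_nodup hP'nd (PySem.List.nodup_pyRange_one 0 n)).mpr ?_
      intro x
      rw [hP'v x, hvperm.mem_iff]
    have hflat : (P'.flatMap (vbtChildren L R)).Perm (kidsOf n L R) :=
      hP'perm.flatMap (fun a _ => List.Perm.refl _)
    have hvnd' := hvis ▸ hvnd
    have htl := List.nodup_cons.mp hvnd'
    refine ⟨tr.2, hr0, hrn, hrk, ?_, ?_, ?_⟩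
    · exact hflat.nodup_iff.mp htl.2
    · have h1 := hflat.length_eq
      have h2 : vis.length = (P'.flatMap (vbtChildren L R)).length + 1 := by
        rw [hvis]; simp
      omega
    · intro v h0 hvn
      exact hvreach v (hvperm.mem_iff.mpr (PySem.List.mem_pyRange_one.mpr ⟨h0, hvn⟩))
  · -- Φ ⇒ A returns True
    rintro ⟨r, hr0, hrn, hrk, hknd, hklen, hreachall⟩
    obtain ⟨r', hr'0, hr'n, hr'k, hr'all, _⟩ := missing_root hWF' hn1 hknd hklen
    have hrr' : r = r' := by
      by_contra hc
      exact hrk (hr'all r hr0 hrn hc)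
    -- the unique missing node id is r
    have hmiss : ∀ x, 0 ≤ x → x < n → (x ∉ kidsOf n L R ↔ x = r) := by
      intro x h0 hxn
      constructor
      · intro hx
        by_contra hc
        rw [hrr'] at hc
        exact hx (hr'all x h0 hxn hc)
      · intro hx; exact hx ▸ hrk
    have hcount : (PySem.List.pyRange 0 n 1).countP (fun i => decide (i ∉ S)) = 1 := by
      have hcong : (PySem.List.pyRange 0 n 1).countP (fun i => decide (i ∉ S)) =
          (PySem.List.pyRange 0 n 1).countP (fun i => i == r) := by
        refine List.countP_congr ?_
        intro x hx
        obtain ⟨h0, hxn⟩ := PySem.List.mem_pyRange_one.mp hx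
        simp only [decide_eq_true_eq, beq_iff_eq]
        rw [hnotS_iff x h0]
        exact hmiss x h0 hxn
      rw [hcong]
      have : (PySem.List.pyRange 0 n 1).countP (fun i => i == r) =
          List.count r (PySem.List.pyRange 0 n 1) := by
        simp [List.count_eq_countP]
      rw [this]
      exact List.count_eq_one_of_mem (PySem.List.nodup_pyRange_one 0 n)
        (PySem.List.mem_pyRange_one.mpr ⟨hr0, hrn⟩)
    have htr1 : tr.1 = 1 := by rw [hfst, hcount]; rfl
    have hbad : ¬(1 < tr.1 ∨ tr.1 = 0) := by omega
    rw [if_neg hbad]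
    have htr2 : tr.2 = r := by
      obtain ⟨hm, hs⟩ := hpos (by omega)
      obtain ⟨h0, hxn⟩ := PySem.List.mem_pyRange_one.mp hm
      exact (hmiss tr.2 h0 hxn).mp ((hnotS_iff tr.2 h0).mp hs)
    have hofl : PySem.Set.ofList [tr.2] = [tr.2] :=
      PySem.Set.ofList_eq_self_of_nodup _ (List.nodup_singleton _)
    rw [hofl, htr2]
    obtain ⟨vis, heq, hvnd, hvmem⟩ := bfs_success hWF' hr0 hrn hknd hrk
      (L.length + 1) [r] [r] [] (bfs_initial_inv hr0 hrn) (by simp; omega)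
    rw [heq]
    have hvperm : vis.Perm (PySem.List.pyRange 0 n 1) := by
      refine (List.perm_ext_iff_of_nodup hvnd (PySem.List.nodup_pyRange_one 0 n)).mpr ?_
      intro x
      rw [hvmem x, PySem.List.mem_pyRange_one]
      constructor
      · intro hx; exact reach_range hWF' hr0 hrn hx
      · intro hx; exact hreachall x hx.1 hx.2
    have := hvperm.length_eq
    rw [PySem.List.length_pyRange_one] at this
    simp only [decide_eq_true_eq]
    omega

theorem B_iff_phi (n : Int) (L R : List Int) (hWF : vbtWF n L R) (hne : L ≠ []) :
    validateBinaryTreeNodes2_alt n L R = true ↔ vbtPhi n L R := by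
  have hg := vbt_guard_false hWF hne
  have hn1 := wf_n_pos hWF hne
  obtain ⟨hn, hlen, hdom⟩ := hWF
  have hWF' : vbtWF n L R := ⟨hn, hlen, hdom⟩
  have hunfold : validateBinaryTreeNodes2_alt n L R =
      (if ((kidsOf n L R).length : Int) ≠ n - 1 ∨ ((PySem.Set.ofList (kidsOf n L R)).length : Int) ≠ n - 1 then false
       else
         decide ((((PySem.List.pyRange 0 n 1).foldl
           (fun (s : PySem.Set Int) _ =>
             PySem.Set.union s (PySem.Set.ofList (s.flatMap (vbtChildren L R))))
           (PySem.Set.ofList [PySem.Int.floordiv (n * (n - 1)) 2 - (kidsOf n L R).sum])).length : Int) = n)) := by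
    simp only [validateBinaryTreeNodes2_alt, if_neg hg]
    rw [kidsB_eq hWF']
  rw [hunfold]
  have hiter : ∀ init : PySem.Set Int,
      (PySem.List.pyRange 0 n 1).foldl
        (fun (s : PySem.Set Int) _ =>
          PySem.Set.union s (PySem.Set.ofList (s.flatMap (vbtChildren L R)))) init =
      (satStep L R)^[n.toNat] init := by
    intro init
    have hf : (fun (s : PySem.Set Int) (_ : Int) =>
        PySem.Set.union s (PySem.Set.ofList (s.flatMap (vbtChildren L R)))) =
        (fun (s : PySem.Set Int) (_ : Int) => satStep L R s) := rfl
    rw [hf, foldl_const_iterate (satStep L R) _ init, PySem.List.length_pyRange_one, sub_zero]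
  by_cases hcond : ((kidsOf n L R).length : Int) ≠ n - 1 ∨ ((PySem.Set.ofList (kidsOf n L R)).length : Int) ≠ n - 1
  · rw [if_pos hcond]
    refine ⟨fun h => absurd h (by simp), fun hphi => ?_⟩
    exfalso
    obtain ⟨r, hr0, hrn, hrk, hknd, hklen, hreachall⟩ := hphi
    rw [PySem.Set.ofList_eq_self_of_nodup _ hknd] at hcond
    rcases hcond with h | h <;> exact h hklen
  · rw [if_neg hcond]
    push_neg at hcond
    obtain ⟨hc1, hc2⟩ := hcond
    have hknd : (kidsOf n L R).Nodup := by
      refine (ofList_len_eq_iff (kidsOf n L R)).mp ?_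
      omega
    obtain ⟨r, hr0, hrn, hrk, hall, hsum⟩ := missing_root hWF' hn1 hknd hc1
    have hroot_eq : PySem.Int.floordiv (n * (n - 1)) 2 - (kidsOf n L R).sum = r := by
      have h2 : n * (n - 1) = 2 * ((kidsOf n L R).sum + r) := by omega
      simp only [PySem.Int.floordiv]
      rw [h2, Int.mul_fdiv_cancel_left _ (by norm_num)]
      omega
    rw [hroot_eq, hiter]
    have hs0 : PySem.Set.ofList [r] = [r] :=
      PySem.Set.ofList_eq_self_of_nodup _ (List.nodup_singleton r)
    have h0 : satQ n r L R (PySem.Set.ofList [r]) := by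
      rw [hs0]
      exact ⟨List.nodup_singleton r, fun v hv => by
        rw [List.mem_singleton.mp hv]; exact ⟨hr0, hrn⟩,
        List.mem_singleton_self r, fun v hv => by
          rw [List.mem_singleton.mp hv]; exact VReach.refl⟩
    obtain ⟨snd, srange, srin, ssound⟩ := sat_iterate_inv hWF' h0 n.toNat
    have hfix := sat_fix hWF' hr0 hrn
    constructor
    · intro hB
      have hlenN : (((satStep L R)^[n.toNat] (PySem.Set.ofList [r])).length : Int) = n := by
        simpa using hB
      have hperm := perm_range_of_full _ snd srange hlenN
      refine ⟨r, hr0, hrn, hrk, hknd, hc1, ?_⟩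
      intro v h0v hvn
      exact ssound v (hperm.mem_iff.mpr (PySem.List.mem_pyRange_one.mpr ⟨h0v, hvn⟩))
    · rintro ⟨r2, hr20, hr2n, hr2k, _, _, hreachall⟩
      have hr2r : r2 = r := by
        by_contra hc
        exact hr2k (hall r2 hr20 hr2n hc)
      rw [hr2r] at hreachall
      have hsub : ∀ x ∈ PySem.List.pyRange 0 n 1, x ∈ (satStep L R)^[n.toNat] (PySem.Set.ofList [r]) := by
        intro x hx
        obtain ⟨h0x, hxn⟩ := PySem.List.mem_pyRange_one.mp hx
        exact sat_complete (n := n) hfix srin (hreachall x h0x hxn)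
      have hperm : ((satStep L R)^[n.toNat] (PySem.Set.ofList [r])).Perm (PySem.List.pyRange 0 n 1) := by
        refine (List.perm_ext_iff_of_nodup snd (PySem.List.nodup_pyRange_one 0 n)).mpr ?_
        intro x
        constructor
        · intro hx
          exact PySem.List.mem_pyRange_one.mpr ⟨(srange x hx).1, (srange x hx).2⟩
        · intro hx; exact hsub x hx
      have := hperm.length_eq
      rw [PySem.List.length_pyRange_one] at this
      simp only [decide_eq_true_eq]
      omega

-- ===== VERDICT (by name: the statement is the Claim_ definition above) =====
theorem validateBinaryTreeNodes2_spec : Claim_equal_validateBinaryTreeNodes2 := by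
  intro n L R _ hpre
  unfold Spec_validateBinaryTreeNodes2
  by_cases hg : L = [] ∨ R = [] ∨ L.length ≠ R.length
  · simp only [validateBinaryTreeNodes2, validateBinaryTreeNodes2_alt, if_pos hg]
  · have hwf : vbtWF n L R := by
      rcases hpre with h | h
      · exact absurd h hg
      · exact h
    have hne : L ≠ [] := by intro h0; exact hg (Or.inl h0)
    have hA := A_iff_phi n L R hwf hne
    have hB := B_iff_phi n L R hwf hne
    exact Bool.eq_iff_iff.mpr (hA.trans hB.symm)
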